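-- pv_equiv track=rewrite | github.com/BARarch/My-Hackerranks | fillingBlocks.py | fillingBlocks
-- ===== SOURCE A (Python) =====
-- def fillingBlocks(n):
--     blocksHash = {0: 1}
--
--     def fillingBlocksHelp(n):
--         if n in blocksHash:
--             return blocksHash[n]
--
--         fits = 0
--
--         for i in range(n):
--             j = n - i
--             if j == 1:
--                 fits += fillingBlocksHelp(i)
--             elif j == 2:
--                 fits += 4 * fillingBlocksHelp(i)
--             elif j % 2: # j is odd, there are 2 indivisibles
--                 fits += 2 * fillingBlocksHelp(i)
--             else:  # j is even, there are 3 indivisibles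
--                 fits += 3 * fillingBlocksHelp(i)
--
--         blocksHash[n] = fits
--         return fits
--
--     return fillingBlocksHelp(n)
-- ===== SOURCE B (Python) =====
-- def fillingBlocks(n):
--     # Linear DP: one pass keeping the last two values of f and two
--     # parity-lagged running prefix sums, instead of A's memoized recursion
--     # that sums over all smaller arguments at every level.
--     if n < 0:
--         return 0
--     prev1, prev2 = 1, 0          # f[k-1], f[k-2]
--     sA, sB = 0, 0                # sA = sum f[i], i <= k-3, parity(i) != parity(k)
--                                  # sB = sum f[i], i <= k-4, parity(i) == parity(k)
--     cur = 1                      # f[0]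
--     for _ in range(n):
--         cur = prev1 + 4 * prev2 + 2 * sA + 3 * sB
--         sA, sB = sB + prev2, sA
--         prev1, prev2 = cur, prev1
--     return cur
-- ===== Notes on version B (the rewrite author's own statement) =====
-- stated objective: faster
-- what changed: Replaced A's memoized recursion, which at every level loops over all smaller arguments (quadratically many weighted additions), by a single linear pass that keeps only the last two sequence values and two parity-lagged running prefix sums.
import Mathlib
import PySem

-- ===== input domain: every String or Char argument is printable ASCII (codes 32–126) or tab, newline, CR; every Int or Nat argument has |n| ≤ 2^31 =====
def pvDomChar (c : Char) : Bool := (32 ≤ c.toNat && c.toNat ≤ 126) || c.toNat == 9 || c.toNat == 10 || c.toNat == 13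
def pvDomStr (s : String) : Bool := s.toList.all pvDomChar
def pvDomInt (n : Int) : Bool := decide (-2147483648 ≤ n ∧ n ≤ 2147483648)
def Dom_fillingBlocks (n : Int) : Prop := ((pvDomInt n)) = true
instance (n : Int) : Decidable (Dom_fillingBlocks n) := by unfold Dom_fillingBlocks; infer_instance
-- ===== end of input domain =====

-- B replaces A's memoized recursion (which at each level sums over all smaller
-- arguments) by a single linear pass keeping the last two values and two
-- parity-lagged running prefix sums; objective: faster (asymptotic).

-- ===== PORT A =====
-- A's inner helper: the memo dict is threaded through the recursion (Python mutates
-- the shared blocksHash); the 'for i in range(n)' loop is the foldl over pyRange.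
-- 'fuel' only makes the recursion structural: with fuel > n it is never exhausted
-- (help_ok below is proved for every fuel > n.toNat).
def fillingBlocksHelp : Nat → Int → PySem.Dict Int Int → Int × PySem.Dict Int Int
  | fuel, n, d =>
    match d.get? n with
    | some v => (v, d)
    | none =>
      match fuel with
      | 0 => (0, d)
      | fuel' + 1 =>
        let r := (PySem.List.pyRange 0 n 1).foldl
          (fun (st : Int × PySem.Dict Int Int) i =>
            let j := n - i
            let rc := fillingBlocksHelp fuel' i st.2
            (if j = 1 then st.1 + rc.1
             else if j = 2 then st.1 + 4 * rc.1
             else if PySem.Int.mod j 2 ≠ 0 then st.1 + 2 * rc.1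
             else st.1 + 3 * rc.1, rc.2))
          (0, d)
        (r.1, r.2.insert n r.1)

def fillingBlocks (n : Int) : Int :=
  let blocksHash : PySem.Dict Int Int := PySem.Dict.empty.insert 0 1
  (fillingBlocksHelp (n.toNat + 1) n blocksHash).1

-- ===== PORT B =====
-- state = (prev1, prev2, sA, sB, cur) exactly as in Source B's loop
def fillingBlocks_alt (n : Int) : Int :=
  if n < 0 then 0
  else
    let st := (List.range n.toNat).foldl
      (fun (st : Int × Int × Int × Int × Int) _ =>
        let cur := st.1 + 4 * st.2.1 + 2 * st.2.2.1 + 3 * st.2.2.2.1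
        (cur, st.1, st.2.2.2.1 + st.2.1, st.2.2.1, cur))
      (1, 0, 0, 0, 1)
    st.2.2.2.2

-- ===== PRECONDITION & SPEC =====
def Spec_fillingBlocks (n : Int) (out : Int) : Prop := out = fillingBlocks_alt n
instance (n : Int) (out : Int) : Decidable (Spec_fillingBlocks n out) := by unfold Spec_fillingBlocks; infer_instance

-- ===== CLAIM (what is proved, stated in full; the proofs are below) =====
def Claim_equal_fillingBlocks : Prop := ∀ (n : Int), Dom_fillingBlocks n → Spec_fillingBlocks n (fillingBlocks n)

-- ===== LEMMAS AND PROOFS =====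

-- weight of a vertical strip of width j (Nat form)
def wN (j : Nat) : Int := if j = 1 then 1 else if j = 2 then 4 else if j % 2 = 1 then 2 else 3

-- weight in A's Int form
def wI (j : Int) : Int := if j = 1 then 1 else if j = 2 then 4 else if PySem.Int.mod j 2 ≠ 0 then 2 else 3

-- the mathematical sequence both programs compute
def g : Nat → Int
  | 0 => 1
  | (k+1) => ((List.range (k+1)).attach.map (fun i => wN (k + 1 - i.1) * g i.1)).sum
termination_by k => k
decreasing_by exact List.mem_range.1 i.2

def G (n : Int) : Int := if n < 0 then 0 else g n.toNat

-- the four state components of B's loop, as functions of the iteration count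
def pm (k : Nat) : Int := if k = 0 then 0 else g (k - 1)
def Sa (k : Nat) : Int := ((List.range (k - 1)).map (fun i => if i % 2 = k % 2 then g i else 0)).sum
def Sb (k : Nat) : Int := ((List.range (k - 2)).map (fun i => if i % 2 = k % 2 then 0 else g i)).sum

lemma g_zero : g 0 = 1 := by rw [g]

lemma g_succ (k : Nat) : g (k+1) = ((List.range (k+1)).map (fun i => wN (k + 1 - i) * g i)).sum := by
  rw [g]; simp

lemma pm_succ (k : Nat) : pm (k + 1) = g k := by simp [pm]

-- drop the (always-zero) last summand of the 3-weighted sum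
lemma sumB_eq (m : Nat) :
    ((List.range m).map (fun i => if i % 2 = (m+1) % 2 then 0 else g i)).sum = Sb (m + 1) := by
  cases m with
  | zero => simp [Sb]
  | succ q =>
    rw [List.range_succ]
    simp only [List.map_append, List.sum_append, List.map_cons, List.map_nil, List.sum_cons,
      List.sum_nil]
    rw [if_pos (by omega : q % 2 = (q + 1 + 1) % 2)]
    unfold Sb
    simp only [add_zero]
    rfl

-- the key recurrence: one step of B computes g (k+1)
lemma gK (k : Nat) : g (k + 1) = g k + 4 * pm k + 2 * Sa k + 3 * Sb k := by
  cases k with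
  | zero =>
    rw [g_succ]
    simp [pm, Sa, Sb, List.range_succ, wN, g_zero]
  | succ m =>
    rw [g_succ]
    rw [List.range_succ, List.range_succ]
    simp only [List.map_append, List.sum_append, List.map_cons, List.map_nil, List.sum_cons,
      List.sum_nil]
    have e1 : wN (m + 1 + 1 - (m + 1)) = 1 := by
      have : m + 1 + 1 - (m + 1) = 1 := by omega
      rw [this]; rfl
    have e2 : wN (m + 1 + 1 - m) = 4 := by
      have : m + 1 + 1 - m = 2 := by omega
      rw [this]; rfl
    rw [e1, e2]
    have hsplit : ((List.range m).map (fun i => wN (m + 1 + 1 - i) * g i)).sum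
        = 2 * ((List.range m).map (fun i => if i % 2 = (m+1) % 2 then g i else 0)).sum
        + 3 * ((List.range m).map (fun i => if i % 2 = (m+1) % 2 then 0 else g i)).sum := by
      rw [← List.sum_map_mul_left, ← List.sum_map_mul_left, ← PySem.List.sum_map_add_int]
      refine congrArg List.sum (List.map_congr_left ?_)
      intro i hi
      have him : i < m := List.mem_range.1 hi
      have hw : wN (m + 1 + 1 - i) = if i % 2 = (m+1) % 2 then 2 else 3 := by
        unfold wN
        rw [if_neg (by omega : ¬ (m + 1 + 1 - i = 1)), if_neg (by omega : ¬ (m + 1 + 1 - i = 2))]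
        by_cases hc : i % 2 = (m+1) % 2
        · rw [if_pos (by omega : (m + 1 + 1 - i) % 2 = 1), if_pos hc]
        · rw [if_neg (by omega : ¬ (m + 1 + 1 - i) % 2 = 1), if_neg hc]
      rw [hw]
      by_cases hc : i % 2 = (m+1) % 2 <;> simp [hc]
    rw [hsplit, sumB_eq, pm_succ]
    have hSa : Sa (m+1) = ((List.range m).map (fun i => if i % 2 = (m+1) % 2 then g i else 0)).sum := by
      unfold Sa
      simp only [Nat.add_sub_cancel]
    rw [← hSa]
    ring

-- transitions of the running sums
lemma Sa_step (k : Nat) : Sa (k + 1) = Sb k + pm k := by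
  cases k with
  | zero => simp [Sa, Sb, pm]
  | succ m =>
    unfold Sa
    simp only [Nat.add_sub_cancel]
    rw [List.range_succ]
    simp only [List.map_append, List.sum_append, List.map_cons, List.map_nil, List.sum_cons,
      List.sum_nil]
    rw [if_pos (by omega : m % 2 = (m + 1 + 1) % 2), pm_succ]
    have hmain : ((List.range m).map (fun i => if i % 2 = (m + 1 + 1) % 2 then g i else 0)).sum
        = Sb (m + 1) := by
      cases m with
      | zero => simp [Sb]
      | succ q =>
        rw [List.range_succ]
        simp only [List.map_append, List.sum_append, List.map_cons, List.map_nil, List.sum_cons,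
          List.sum_nil]
        rw [if_neg (by omega : ¬ q % 2 = (q + 1 + 1 + 1) % 2)]
        unfold Sb
        simp only [add_zero]
        refine congrArg List.sum (List.map_congr_left ?_)
        intro i _
        by_cases hc : i % 2 = (q + 1 + 1 + 1) % 2
        · rw [if_pos hc, if_neg (by omega : ¬ i % 2 = (q + 1 + 1) % 2)]
        · rw [if_neg hc, if_pos (by omega : i % 2 = (q + 1 + 1) % 2)]
    rw [hmain]
    ring

lemma Sb_step (k : Nat) : Sb (k + 1) = Sa k := by
  unfold Sa Sb
  have hr : k + 1 - 2 = k - 1 := by omega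
  rw [hr]
  refine congrArg List.sum (List.map_congr_left ?_)
  intro i _
  by_cases hc : i % 2 = (k+1) % 2
  · rw [if_pos hc, if_neg (by omega : ¬ i % 2 = k % 2)]
  · rw [if_neg hc, if_pos (by omega : i % 2 = k % 2)]

-- B's loop invariant
lemma stB_inv (k : Nat) :
    (List.range k).foldl
      (fun (st : Int × Int × Int × Int × Int) _ =>
        let cur := st.1 + 4 * st.2.1 + 2 * st.2.2.1 + 3 * st.2.2.2.1
        (cur, st.1, st.2.2.2.1 + st.2.1, st.2.2.1, cur))
      (1, 0, 0, 0, 1)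
    = (g k, pm k, Sa k, Sb k, g k) := by
  induction k with
  | zero => simp [g_zero, pm, Sa, Sb]
  | succ k ih =>
    rw [List.range_succ, List.foldl_append, ih]
    simp only [List.foldl_cons, List.foldl_nil]
    have h1 := (gK k).symm
    have h2 := (pm_succ k).symm
    have h3 := (Sa_step k).symm
    have h4 := (Sb_step k).symm
    simp only [Prod.mk.injEq]
    exact ⟨h1, h2, h3, h4, h1⟩

-- dict invariant for A's memo
def PD (d : PySem.Dict Int Int) : Prop :=
  (∀ k v, d.get? k = some v → v = G k) ∧ d.get? 0 = some 1

lemma PD_insert {d : PySem.Dict Int Int} (hd : PD d) {n v : Int} (hn : n ≠ 0) (hv : v = G n) :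
    PD (d.insert n v) := by
  constructor
  · intro k w hw
    rw [PySem.Dict.get?_insert] at hw
    by_cases hk : k = n
    · rw [if_pos hk] at hw; cases hw; rw [hk, hv]
    · rw [if_neg hk] at hw; exact hd.1 k w hw
  · rw [PySem.Dict.get?_insert, if_neg (fun e => hn e.symm)]; exact hd.2

-- A's summand equals the Nat-form weight on in-range indices
lemma wI_eq_wN (n : Int) (k : Nat) (hk : (k : Int) < n) :
    wI (n - k) = wN (n.toNat - k) := by
  unfold wI wN
  have hcast : n - (k : Int) = ((n.toNat - k : Nat) : Int) := by omega
  have hmod : PySem.Int.mod (n - k) 2 = (((n.toNat - k) % 2 : Nat) : Int) := by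
    rw [hcast]; exact_mod_cast PySem.Int.mod_natCast (n.toNat - k) 2
  by_cases h1 : n.toNat - k = 1
  · rw [if_pos (by omega), if_pos h1]
  · rw [if_neg (by omega), if_neg h1]
    by_cases h2 : n.toNat - k = 2
    · rw [if_pos (by omega), if_pos h2]
    · rw [if_neg (by omega), if_neg h2]
      by_cases h3 : (n.toNat - k) % 2 = 1
      · rw [if_pos (by rw [hmod]; omega), if_pos h3]
      · rw [if_neg (by rw [hmod]; omega), if_neg h3]

-- the full-recurrence form of A's loop sum
lemma loop_sum_eq (n : Int) (hn : 0 < n) :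
    ((PySem.List.pyRange 0 n 1).map (fun i => wI (n - i) * G i)).sum = g n.toNat := by
  obtain ⟨m, hm⟩ : ∃ m, n.toNat = m + 1 := ⟨n.toNat - 1, by omega⟩
  rw [PySem.List.pyRange_one]
  have hno : (n - 0).toNat = n.toNat := by omega
  rw [hno, List.map_map]
  have hcongr : ∀ k ∈ List.range n.toNat,
      ((fun i => wI (n - i) * G i) ∘ fun k : Nat => 0 + (k : Int)) k
        = wN (n.toNat - k) * g k := by
    intro k hk
    have hk' := List.mem_range.1 hk
    simp only [Function.comp, zero_add]
    have hGk : G (k : Int) = g k := by simp [G]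
    rw [wI_eq_wN n k (by omega), hGk]
  rw [List.map_congr_left hcongr, hm, ← g_succ]

-- A's inner loop: correctness of the fold given the IH for smaller calls
lemma loopA_ok (fuel : Nat) (n : Int)
    (ihN : ∀ i d, 0 ≤ i → i < n → PD d →
      (fillingBlocksHelp fuel i d).1 = G i ∧ PD (fillingBlocksHelp fuel i d).2) :
    ∀ (l : List Int), (∀ i ∈ l, 0 ≤ i ∧ i < n) → ∀ (fits : Int) (d : PySem.Dict Int Int), PD d →
      ((l.foldl
          (fun (st : Int × PySem.Dict Int Int) i =>
            let j := n - i
            let rc := fillingBlocksHelp fuel i st.2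
            (if j = 1 then st.1 + rc.1
             else if j = 2 then st.1 + 4 * rc.1
             else if PySem.Int.mod j 2 ≠ 0 then st.1 + 2 * rc.1
             else st.1 + 3 * rc.1, rc.2))
          (fits, d)).1 = fits + (l.map (fun i => wI (n - i) * G i)).sum ∧
        PD ((l.foldl
          (fun (st : Int × PySem.Dict Int Int) i =>
            let j := n - i
            let rc := fillingBlocksHelp fuel i st.2
            (if j = 1 then st.1 + rc.1
             else if j = 2 then st.1 + 4 * rc.1
             else if PySem.Int.mod j 2 ≠ 0 then st.1 + 2 * rc.1
             else st.1 + 3 * rc.1, rc.2))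
          (fits, d)).2)) := by
  intro l
  induction l with
  | nil => intro _ fits d hd; exact ⟨by simp, hd⟩
  | cons i rest ih =>
    intro h fits d hd
    have hi := h i (List.mem_cons_self ..)
    obtain ⟨h1, h2⟩ := ihN i d hi.1 hi.2 hd
    simp only [List.foldl_cons]
    have hrest := ih (fun i' hi' => h i' (List.mem_cons_of_mem _ hi'))
      (if n - i = 1 then fits + (fillingBlocksHelp fuel i d).1
        else if n - i = 2 then fits + 4 * (fillingBlocksHelp fuel i d).1
        else if PySem.Int.mod (n - i) 2 ≠ 0 then fits + 2 * (fillingBlocksHelp fuel i d).1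
        else fits + 3 * (fillingBlocksHelp fuel i d).1)
      (fillingBlocksHelp fuel i d).2 h2
    refine ⟨?_, hrest.2⟩
    rw [hrest.1, h1]
    simp only [List.map_cons, List.sum_cons, wI]
    split_ifs <;> ring

-- A's helper computes G for any sufficient fuel, preserving the memo invariant
lemma help_ok : ∀ (fuel : Nat) (n : Int) (d : PySem.Dict Int Int), n.toNat < fuel → PD d →
    (fillingBlocksHelp fuel n d).1 = G n ∧ PD (fillingBlocksHelp fuel n d).2 := by
  intro fuel
  induction fuel with
  | zero => intro n d h; exact absurd h (Nat.not_lt_zero _)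
  | succ N ih =>
    intro n d hN hd
    rw [fillingBlocksHelp]
    cases hg : d.get? n with
    | some v => exact ⟨hd.1 n v hg, hd⟩
    | none =>
      have hn0 : n ≠ 0 := by
        intro e; rw [e, hd.2] at hg; cases hg
      have ihN : ∀ i d', 0 ≤ i → i < n → PD d' →
          (fillingBlocksHelp N i d').1 = G i ∧ PD (fillingBlocksHelp N i d').2 := by
        intro i d' h0 hlt hd'
        exact ih i d' (by omega) hd'
      have L := loopA_ok N n ihN (PySem.List.pyRange 0 n 1)
        (fun _ hi => PySem.List.mem_pyRange_one.1 hi) 0 d hd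
      have hfst : ((PySem.List.pyRange 0 n 1).foldl
          (fun (st : Int × PySem.Dict Int Int) i =>
            let j := n - i
            let rc := fillingBlocksHelp N i st.2
            (if j = 1 then st.1 + rc.1
             else if j = 2 then st.1 + 4 * rc.1
             else if PySem.Int.mod j 2 ≠ 0 then st.1 + 2 * rc.1
             else st.1 + 3 * rc.1, rc.2))
          (0, d)).1 = G n := by
        rw [L.1]
        by_cases hneg : n < 0
        · have hnil : PySem.List.pyRange 0 n 1 = [] :=
            PySem.List.pyRange_one_eq_nil (by omega : n ≤ 0)
          rw [hnil]
          simp [G, hneg]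
        · rw [loop_sum_eq n (by omega)]
          simp [G, hneg]
      exact ⟨hfst, PD_insert L.2 hn0 hfst⟩

-- ===== VERDICT (by name: the statement is the Claim_ definition above) =====
theorem fillingBlocks_spec : Claim_equal_fillingBlocks := by
  intro n _
  unfold Spec_fillingBlocks fillingBlocks fillingBlocks_alt
  have hPD : PD (PySem.Dict.empty.insert 0 1) := by
    constructor
    · intro k v hv
      rw [PySem.Dict.get?_insert] at hv
      by_cases hk : k = (0:Int)
      · rw [if_pos hk] at hv; cases hv; rw [hk]; simp [G, g_zero]
      · rw [if_neg hk, PySem.Dict.get?_empty] at hv; cases hv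
    · rw [PySem.Dict.get?_insert, if_pos rfl]
  have hA := (help_ok (n.toNat + 1) n _ (by omega) hPD).1
  simp only []
  rw [hA]
  by_cases hneg : n < 0
  · simp [G, hneg]
  · rw [if_neg hneg]
    simp only [stB_inv n.toNat]
    simp [G, hneg]
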